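-- pv_equiv track=rewrite | github.com/dinandaputra/Shopify-Bulk-Importer | domain/services/product_domain_service.py | calculate_variant_inventory
-- ===== SOURCE A (Python) =====
-- from typing import List, Dict, Any, Optional
--
-- def calculate_variant_inventory(total_quantity: int, variant_count: int) -> List[int]:
--     """
--     Calculate inventory distribution across variants.
--
--     Args:
--         total_quantity: Total inventory available
--         variant_count: Number of variants to distribute to
--
--     Returns:
--         List of inventory quantities per variant
--     """
--     if variant_count <= 0:
--         raise ValueError("Variant count must be positive")
--
--     if total_quantity < 0:
--         raise ValueError("Total quantity cannot be negative")
--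
--     # Calculate base quantity per variant
--     base_quantity = total_quantity // variant_count
--     remainder = total_quantity % variant_count
--
--     # Distribute inventory
--     quantities = [base_quantity] * variant_count
--
--     # Distribute remainder to first variants
--     for i in range(remainder):
--         quantities[i] += 1
--
--     return quantities
-- ===== SOURCE B (Python) =====
-- def calculate_variant_inventory(total_quantity: int, variant_count: int):
--     if variant_count <= 0:
--         raise ValueError("Variant count must be positive")
--     if total_quantity < 0:
--         raise ValueError("Total quantity cannot be negative")
--     quantities = []
--     remaining = total_quantity
--     for slots_left in range(variant_count, 0, -1):
--         share = -(-remaining // slots_left)  # ceiling division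
--         quantities.append(share)
--         remaining -= share
--     return quantities
-- ===== Notes on version B (the rewrite author's own statement) =====
-- stated objective: alternative
-- what changed: B never computes base/remainder or builds block lists: it peels the distribution greedily, giving each slot the ceiling of remaining/slots_left and subtracting it, a single running-accumulator pass whose correctness rests on the invariant that ceil-peeling yields the even split with extras at the front.
import Mathlib
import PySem

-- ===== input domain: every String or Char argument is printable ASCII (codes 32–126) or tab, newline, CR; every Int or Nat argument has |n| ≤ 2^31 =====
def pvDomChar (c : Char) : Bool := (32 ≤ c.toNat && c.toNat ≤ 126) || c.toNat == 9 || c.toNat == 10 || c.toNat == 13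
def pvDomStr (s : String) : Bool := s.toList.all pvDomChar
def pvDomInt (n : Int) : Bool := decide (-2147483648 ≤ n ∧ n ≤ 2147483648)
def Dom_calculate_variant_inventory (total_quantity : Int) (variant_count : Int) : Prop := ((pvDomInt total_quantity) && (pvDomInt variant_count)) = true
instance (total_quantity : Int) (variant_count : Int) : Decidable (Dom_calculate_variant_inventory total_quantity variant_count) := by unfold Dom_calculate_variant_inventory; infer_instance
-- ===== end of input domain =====

-- B replaces A's divmod + uniform-list + patch loop by greedy ceil-peeling: each slot takes ceil(remaining/slots_left) of a running remainder (alternative decomposition, same cost).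


-- ===== PORT A =====
def calculate_variant_inventory (total_quantity : Int) (variant_count : Int) : List Int :=
  let base_quantity := PySem.Int.floordiv total_quantity variant_count
  let remainder := PySem.Int.mod total_quantity variant_count
  let quantities := List.replicate variant_count.toNat base_quantity
  -- for i in range(remainder): quantities[i] += 1   (pyGet? guard only makes the step total; in range under Pre_)
  (PySem.List.pyRange 0 remainder 1).foldl
    (fun qs i => match PySem.List.pyGet? qs i with
      | some v => qs.set i.toNat (v + 1)
      | none => qs) quantities

-- ===== PORT B =====
-- the loop 'for slots_left in range(variant_count, 0, -1)' as structural recursion on slots_left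
def pvPeel (remaining : Int) : Nat → List Int
  | 0 => []
  | Nat.succ k =>
    let share := -(PySem.Int.floordiv (-remaining) ((k + 1 : Nat) : Int))  -- -(-remaining // slots_left)
    share :: pvPeel (remaining - share) k

def calculate_variant_inventory_alt (total_quantity : Int) (variant_count : Int) : List Int :=
  pvPeel total_quantity variant_count.toNat

-- ===== PRECONDITION & SPEC =====
-- Pre_ excludes exactly the inputs where the Python raises ValueError (variant_count <= 0 or total_quantity < 0).
def Pre_calculate_variant_inventory (total_quantity : Int) (variant_count : Int) : Prop :=
  0 < variant_count ∧ 0 ≤ total_quantity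
instance (total_quantity : Int) (variant_count : Int) : Decidable (Pre_calculate_variant_inventory total_quantity variant_count) := by unfold Pre_calculate_variant_inventory; infer_instance
def pvWitness_calculate_variant_inventory : Int × Int := (7, 3)

def Spec_calculate_variant_inventory (total_quantity : Int) (variant_count : Int) (out : List Int) : Prop := out = calculate_variant_inventory_alt total_quantity variant_count
instance (total_quantity : Int) (variant_count : Int) (out : List Int) : Decidable (Spec_calculate_variant_inventory total_quantity variant_count out) := by unfold Spec_calculate_variant_inventory; infer_instance

-- ===== CLAIM (what is proved, stated in full; the proofs are below) =====
def Claim_equal_calculate_variant_inventory : Prop := ∀ (total_quantity : Int) (variant_count : Int), Dom_calculate_variant_inventory total_quantity variant_count → Pre_calculate_variant_inventory total_quantity variant_count → Spec_calculate_variant_inventory total_quantity variant_count (calculate_variant_inventory total_quantity variant_count)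

-- ===== LEMMAS AND PROOFS =====

-- A's patch loop: after incrementing the first r entries of a uniform list of length n, two homogeneous blocks remain.
theorem patch_loop_eq (b : Int) : ∀ (r n : Nat), r ≤ n →
    (PySem.List.pyRange 0 (r : Int) 1).foldl
      (fun (qs : List Int) (i : Int) => match PySem.List.pyGet? qs i with
        | some v => qs.set i.toNat (v + 1)
        | none => qs) (List.replicate n b)
    = List.replicate r (b + 1) ++ List.replicate (n - r) b := by
  intro r
  induction r with
  | zero =>
    intro n _
    simp [PySem.List.pyRange_one_eq_nil]
  | succ r ih =>
    intro n hrn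
    have hcast : ((r + 1 : Nat) : Int) = (r : Int) + 1 := by push_cast; ring
    rw [hcast, PySem.List.pyRange_one_succ_right (by positivity), List.foldl_append,
      ih n (by omega)]
    have hsplit : n - r = (n - (r + 1)) + 1 := by omega
    rw [hsplit]
    rw [List.replicate_succ (n := n - (r + 1))]
    have hget : PySem.List.pyGet?
        (List.replicate r (b + 1) ++ b :: List.replicate (n - (r + 1)) b) (r : Int)
        = some b := by
      rw [PySem.List.pyGet?_natCast]
      rw [List.getElem?_append_right (by simp)]
      simp
    simp only [List.foldl_cons, List.foldl_nil, hget, Int.toNat_natCast]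
    rw [List.set_append_right _ _ (by simp)]
    simp [List.replicate_succ' (n := r), List.append_assoc]

-- B's greedy ceil-peeling computes the same two homogeneous blocks: the first slot takes b+1 iff r > 0.
theorem peel_eq (b : Int) : ∀ (n r : Nat), r < n →
    pvPeel (b * n + r) n = List.replicate r (b + 1) ++ List.replicate (n - r) b := by
  intro n
  induction n with
  | zero => intro r h; omega
  | succ m ih =>
    intro r hr
    have hpos : (0 : Int) < ((m + 1 : Nat) : Int) := by positivity
    by_cases hr0 : r = 0
    · subst hr0
      have hshare : -(PySem.Int.floordiv (-(b * ((m+1:Nat):Int) + (0:Nat))) ((m + 1 : Nat) : Int)) = b := by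
        rw [PySem.Int.neg_floordiv_neg_eq_iff_of_pos hpos]
        push_cast
        constructor <;> nlinarith
      rcases Nat.eq_zero_or_pos m with hm | hm
      · subst hm
        simp only [pvPeel, hshare]
        norm_num [pvPeel, List.replicate]
      · have ih0 := ih 0 hm
        simp only [Nat.cast_zero, add_zero, Nat.sub_zero, List.replicate_zero,
          List.nil_append] at ih0
        simp only [pvPeel, hshare]
        rw [show b * ((m + 1 : Nat) : Int) + ((0 : Nat) : Int) - b = b * ((m : Nat) : Int) from by push_cast; ring, ih0]
        simp [List.replicate_succ]
    · have hshare : -(PySem.Int.floordiv (-(b * ((m+1:Nat):Int) + (r:Nat))) ((m + 1 : Nat) : Int)) = b + 1 := by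
        rw [PySem.Int.neg_floordiv_neg_eq_iff_of_pos hpos]
        have h1 : (1:Int) ≤ (r:Int) := by exact_mod_cast Nat.one_le_iff_ne_zero.mpr hr0
        have h2 : (r:Int) ≤ (m:Int) := by exact_mod_cast Nat.lt_succ_iff.mp hr
        push_cast
        constructor <;> nlinarith
      have hrest : b * ((m+1:Nat):Int) + ((r:Nat):Int) - (b + 1) = b * ((m:Nat):Int) + (((r-1:Nat)):Int) := by
        have : ((r - 1 : Nat) : Int) = (r : Int) - 1 := by
          have := Nat.one_le_iff_ne_zero.mpr hr0; push_cast [this]; ring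
        rw [this]; push_cast; ring
      simp only [pvPeel, hshare, hrest, ih (r - 1) (by omega)]
      have hr1 : r = (r - 1) + 1 := by omega
      have hmr : m - (r - 1) = (m + 1) - r := by omega
      rw [hmr]
      conv_rhs => rw [hr1, List.replicate_succ]
      simp
      omega

theorem calculate_variant_inventory_eq (total_quantity variant_count : Int)
    (h : Pre_calculate_variant_inventory total_quantity variant_count) :
    calculate_variant_inventory total_quantity variant_count
      = calculate_variant_inventory_alt total_quantity variant_count := by
  obtain ⟨hv, ht⟩ := h
  set b := PySem.Int.floordiv total_quantity variant_count with hb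
  set r := PySem.Int.mod total_quantity variant_count with hrdef
  have hr0 : 0 ≤ r := PySem.Int.mod_nonneg total_quantity hv
  have hrlt : r < variant_count := PySem.Int.mod_lt total_quantity hv
  have hdecomp : b * variant_count + r = total_quantity := by
    rw [hb, hrdef]; exact PySem.Int.floordiv_mul_add_mod total_quantity variant_count
  have hvc : ((variant_count.toNat : Nat) : Int) = variant_count := Int.toNat_of_nonneg (le_of_lt hv)
  have hrc : ((r.toNat : Nat) : Int) = r := Int.toNat_of_nonneg hr0
  have hlt : r.toNat < variant_count.toNat := by omega
  have hA : calculate_variant_inventory total_quantity variant_count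
      = List.replicate r.toNat (b + 1) ++ List.replicate (variant_count.toNat - r.toNat) b := by
    unfold calculate_variant_inventory
    rw [← hb, ← hrdef, ← hrc]
    exact patch_loop_eq _ _ _ (le_of_lt hlt)
  have hB : calculate_variant_inventory_alt total_quantity variant_count
      = List.replicate r.toNat (b + 1) ++ List.replicate (variant_count.toNat - r.toNat) b := by
    unfold calculate_variant_inventory_alt
    have harg : total_quantity = b * ((variant_count.toNat : Nat) : Int) + ((r.toNat : Nat) : Int) := by
      rw [hvc, hrc]; omega
    rw [harg]
    exact peel_eq b variant_count.toNat r.toNat hlt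
  rw [hA, hB]

-- ===== VERDICT (by name: the statement is the Claim_ definition above) =====
theorem calculate_variant_inventory_spec : Claim_equal_calculate_variant_inventory := by
  intro tq vc _ hpre
  exact calculate_variant_inventory_eq tq vc hpre
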